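-- pv_equiv track=rewrite | github.com/Leepilung/TIL | 문제풀이/deduplication.py | duplication
-- ===== SOURCE A (Python) =====
-- def duplication(A):
--     start = 0
--     while start < len(A)-1:
--         if A[start] == A[start +1]:
--             del A[start+1]
--         else:
--             start += 1
--     return len(A)
-- ===== SOURCE B (Python) =====
-- def duplication(A):
--     # Single O(n) pass counting runs (A is O(n^2) due to repeated del).
--     # Note: A mutates its argument in place; B does not — equivalence is about the return value.
--     if not A:
--         return 0
--     count = 1
--     prev = A[0]
--     for x in A[1:]:
--         if x != prev:
--             count += 1
--             prev = x
--     return count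
-- ===== Notes on version B (the rewrite author's own statement) =====
-- stated objective: faster
-- what changed: Replaces the quadratic while-loop that repeatedly deletes adjacent duplicates in place with a single linear pass that counts runs (positions where the element differs from its predecessor); B does not mutate the input.
import Mathlib
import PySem

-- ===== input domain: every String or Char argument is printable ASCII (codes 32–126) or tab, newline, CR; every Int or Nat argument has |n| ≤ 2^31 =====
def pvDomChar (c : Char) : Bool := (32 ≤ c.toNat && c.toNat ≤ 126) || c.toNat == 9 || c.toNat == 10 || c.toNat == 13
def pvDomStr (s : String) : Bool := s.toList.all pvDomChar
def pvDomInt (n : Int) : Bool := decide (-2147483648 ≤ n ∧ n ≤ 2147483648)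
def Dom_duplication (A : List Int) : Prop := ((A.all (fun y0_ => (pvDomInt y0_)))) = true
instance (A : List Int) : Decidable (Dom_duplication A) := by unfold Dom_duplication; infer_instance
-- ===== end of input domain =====

-- B replaces A's quadratic delete-in-place loop with one linear pass counting runs (timed asymptotically faster).
-- A mutates its argument in place (del); B does not — the equivalence proved here is about the return value only.


-- ===== PORT A =====
-- while start < len(A)-1: if A[start]==A[start+1]: del A[start+1] else start += 1; return len(A)
def loopA (A : List Int) (start : Nat) : Int :=
  if h : start < A.length - 1 then
    if A.getD start 0 = A.getD (start + 1) 0 then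
      loopA (A.eraseIdx (start + 1)) start
    else
      loopA A (start + 1)
  else
    (A.length : Int)
termination_by A.length - start
decreasing_by
  · have h2 : start + 1 < A.length := by omega
    simp [List.length_eraseIdx, h2]; omega
  · omega

def duplication (A : List Int) : Int := loopA A 0

-- ===== PORT B =====
def altLoop (prev : Int) (count : Int) : List Int → Int
  | [] => count
  | x :: t => if x ≠ prev then altLoop x (count + 1) t else altLoop prev count t

def duplication_alt (A : List Int) : Int :=
  match A with
  | [] => 0
  | h :: t => altLoop h 1 t

-- ===== PRECONDITION & SPEC =====
def Spec_duplication (A : List Int) (out : Int) : Prop := out = duplication_alt A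
instance (A : List Int) (out : Int) : Decidable (Spec_duplication A out) := by unfold Spec_duplication; infer_instance

-- ===== CLAIM (what is proved, stated in full; the proofs are below) =====
def Claim_equal_duplication : Prop := ∀ (A : List Int), Dom_duplication A → Spec_duplication A (duplication A)

-- ===== LEMMAS AND PROOFS =====

-- adjacent-duplicate removal, the common characterisation of both ports
def dedup : List Int → List Int
  | [] => []
  | [x] => [x]
  | x :: y :: t => if x = y then dedup (x :: t) else x :: dedup (y :: t)
termination_by l => l.length

lemma drop_eraseIdx_succ (A : List Int) (s : Nat) :
    (A.eraseIdx (s + 1)).drop s = (A.drop s).eraseIdx 1 := by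
  induction A generalizing s with
  | nil => simp
  | cons a t ih =>
    cases s with
    | zero => simp [List.eraseIdx]
    | succ s => simpa [List.eraseIdx] using ih s

lemma loopA_eq (A : List Int) (s : Nat) (hs : s ≤ A.length) :
    loopA A s = (s : Int) + ((dedup (A.drop s)).length : Int) := by
  rw [loopA]
  by_cases h : s < A.length - 1
  · have hlen : 2 ≤ (A.drop s).length := by simp [List.length_drop]; omega
    obtain ⟨x, y, t, hd⟩ : ∃ x y t, A.drop s = x :: y :: t := by
      match hA : A.drop s, hlen with
      | x :: y :: t, _ => exact ⟨x, y, t, rfl⟩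
    have hx : A.getD s 0 = x := by
      have h0 := List.getElem?_drop (xs := A) (i := s) (j := 0)
      rw [hd] at h0
      simp at h0
      simp [List.getD, ← h0]
    have hy : A.getD (s + 1) 0 = y := by
      have h1 := List.getElem?_drop (xs := A) (i := s) (j := 1)
      rw [hd] at h1
      simp at h1
      simp [List.getD, ← h1]
    by_cases hxy : A.getD s 0 = A.getD (s + 1) 0
    · have hlen' : s ≤ (A.eraseIdx (s + 1)).length := by
        rw [List.length_eraseIdx]
        split <;> omega
      rw [dif_pos h, if_pos hxy, loopA_eq _ _ hlen']
      rw [drop_eraseIdx_succ, hd]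
      have : x = y := by rw [← hx, ← hy]; exact hxy
      simp [List.eraseIdx, dedup, this]
    · have hs' : s + 1 ≤ A.length := by omega
      rw [dif_pos h, if_neg hxy, loopA_eq _ _ hs']
      have hdrop : A.drop (s + 1) = y :: t := by
        have : A.drop (s + 1) = (A.drop s).drop 1 := by
          rw [← List.drop_drop]
        rw [this, hd]; rfl
      have hne : x ≠ y := by rw [← hx, ← hy]; exact hxy
      rw [hd, hdrop, dedup, if_neg hne]
      simp [List.length_cons]
      ring
  · rw [dif_neg h]
    have h1 : (A.drop s).length ≤ 1 := by simp [List.length_drop]; omega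
    match hA : A.drop s, h1 with
    | [], _ =>
      have : A.length = s := by
        have := List.length_drop (l := A) (i := s); rw [hA] at this
        simp at this; omega
      simp [dedup, this]
    | [x], _ =>
      have : A.length = s + 1 := by
        have := List.length_drop (l := A) (i := s); rw [hA] at this
        simp at this; omega
      simp [dedup, this]
termination_by A.length - s
decreasing_by
  · have h2 : s + 1 < A.length := by omega
    simp [List.length_eraseIdx, h2]; omega
  · omega

lemma altLoop_eq (t : List Int) (h c : Int) :
    altLoop h c t = c - 1 + ((dedup (h :: t)).length : Int) := by
  induction t generalizing h c with
  | nil => simp [altLoop, dedup]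
  | cons y t' ih =>
    by_cases hyh : y = h
    · rw [altLoop, if_neg (by simp [hyh]), ih, dedup, if_pos hyh.symm]
    · rw [altLoop, if_pos hyh, ih, dedup, if_neg (fun e => hyh e.symm)]
      simp [List.length_cons]

lemma alt_eq_dedup (A : List Int) : duplication_alt A = ((dedup A).length : Int) := by
  cases A with
  | nil => simp [duplication_alt, dedup]
  | cons h t => rw [duplication_alt, altLoop_eq]; ring

-- ===== VERDICT (by name: the statement is the Claim_ definition above) =====
theorem duplication_spec : Claim_equal_duplication := by
  intro A _
  unfold Spec_duplication duplication
  rw [loopA_eq A 0 (Nat.zero_le _), alt_eq_dedup]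
  simp
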